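-- pv_equiv track=rewrite | github.com/ntcong7929/XW-TOOL | cdtd.py | calculate_heat_index
-- ===== SOURCE A (Python) =====
-- def calculate_heat_index(recent_results, total_wins):
--     heat_scores = {}
--
--     for athlete_id in range(1, 7):
--         base_score = total_wins.get(athlete_id, 0)
--
--         recent_10 = (
--             recent_results[-10:] if len(recent_results) >= 10 else recent_results
--         )
--         recent_wins = recent_10.count(athlete_id)
--
--         recent_5 = recent_results[-5:] if len(recent_results) >= 5 else recent_results
--         super_recent_wins = recent_5.count(athlete_id)
--
--         last_win_distance = 0
--         for i, result in enumerate(reversed(recent_results)):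
--             if result == athlete_id:
--                 last_win_distance = i
--                 break
--         else:
--             last_win_distance = len(recent_results)
--
--         heat_scores[athlete_id] = {
--             "base_score": base_score,
--             "recent_10_wins": recent_wins,
--             "recent_5_wins": super_recent_wins,
--             "last_win_distance": last_win_distance,
--             "pressure_score": min(last_win_distance * 2, 20),
--             "cooling_factor": max(0, super_recent_wins - 1) * 3,
--         }
--
--     return heat_scores
-- ===== SOURCE B (Python) =====
-- def calculate_heat_index(recent_results, total_wins):
--     n = len(recent_results)
--
--     # one pass over each short window: frequency tables for ALL athletes at once
--     c10 = {}
--     for r in recent_results[-10:]: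
--         c10[r] = c10.get(r, 0) + 1
--     c5 = {}
--     for r in recent_results[-5:]:
--         c5[r] = c5.get(r, 0) + 1
--
--     # one forward pass recording the LAST index at which each athlete won
--     last = {}
--     for i, r in enumerate(recent_results):
--         last[r] = i
--
--     heat_scores = {}
--     for athlete_id in range(1, 7):
--         s5 = c5.get(athlete_id, 0)
--         if athlete_id in last:
--             d = n - 1 - last[athlete_id]
--         else:
--             d = n
--         heat_scores[athlete_id] = {
--             "base_score": total_wins.get(athlete_id, 0),
--             "recent_10_wins": c10.get(athlete_id, 0),
--             "recent_5_wins": s5,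
--             "last_win_distance": d,
--             "pressure_score": min(d * 2, 20),
--             "cooling_factor": max(0, s5 - 1) * 3,
--         }
--     return heat_scores
-- ===== Notes on version B (the rewrite author's own statement) =====
-- stated objective: alternative
-- what changed: Instead of scanning recent_results per athlete (count on both windows plus a reversed search, repeated 6 times), B makes single passes that build frequency tables for the two windows and a last-win-index table for all athletes at once, then reads each athlete's metrics from the tables.
import Mathlib
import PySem

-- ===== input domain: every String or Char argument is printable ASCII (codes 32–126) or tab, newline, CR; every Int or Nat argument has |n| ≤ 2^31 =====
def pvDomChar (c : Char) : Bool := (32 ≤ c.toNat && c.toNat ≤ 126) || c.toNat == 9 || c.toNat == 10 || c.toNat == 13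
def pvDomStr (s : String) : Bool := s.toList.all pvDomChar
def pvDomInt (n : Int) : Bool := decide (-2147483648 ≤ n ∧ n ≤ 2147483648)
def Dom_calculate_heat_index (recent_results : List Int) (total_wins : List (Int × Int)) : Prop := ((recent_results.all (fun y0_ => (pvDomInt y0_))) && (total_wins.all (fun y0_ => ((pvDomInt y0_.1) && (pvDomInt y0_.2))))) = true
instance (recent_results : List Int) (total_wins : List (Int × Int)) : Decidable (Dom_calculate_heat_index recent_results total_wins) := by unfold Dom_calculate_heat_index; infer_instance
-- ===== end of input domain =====

-- B replaces A's six per-athlete scans of recent_results by single passes building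
-- shared tables (window frequency dicts, last-win-index dict); same results, different traversal.

-- ===== PORT A =====
-- the 'for i, result in enumerate(reversed(recent_results)): if result == athlete_id: ...; break / else:' loop
def pvLoopA (athlete_id fallback : Int) : List Int → Int → Int
  | [], _ => fallback
  | r :: rest, i => if r = athlete_id then i else pvLoopA athlete_id fallback rest (i + 1)

def calculate_heat_index (recent_results : List Int) (total_wins : List (Int × Int)) : List (Int × List (String × Int)) :=
  ((PySem.List.pyRange 1 7 1).foldl (fun heat_scores athlete_id =>
    let base_score := (PySem.Dict.mk total_wins).getD athlete_id 0
    let recent_10 := if recent_results.length ≥ 10 then PySem.List.slice recent_results (some (-10)) none else recent_results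
    let recent_wins : Int := PySem.List.count recent_10 athlete_id
    let recent_5 := if recent_results.length ≥ 5 then PySem.List.slice recent_results (some (-5)) none else recent_results
    let super_recent_wins : Int := PySem.List.count recent_5 athlete_id
    let last_win_distance := pvLoopA athlete_id (recent_results.length : Int) recent_results.reverse 0
    heat_scores.insert athlete_id
      [("base_score", base_score),
       ("recent_10_wins", recent_wins),
       ("recent_5_wins", super_recent_wins),
       ("last_win_distance", last_win_distance),
       ("pressure_score", min (last_win_distance * 2) 20),
       ("cooling_factor", max 0 (super_recent_wins - 1) * 3)])
    PySem.Dict.empty).items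

-- ===== PORT B =====
def calculate_heat_index_alt (recent_results : List Int) (total_wins : List (Int × Int)) : List (Int × List (String × Int)) :=
  let n : Int := recent_results.length
  let c10 := (PySem.List.slice recent_results (some (-10)) none).foldl
    (fun c10 r => c10.insert r (c10.getD r 0 + 1)) (PySem.Dict.empty : PySem.Dict Int Int)
  let c5 := (PySem.List.slice recent_results (some (-5)) none).foldl
    (fun c5 r => c5.insert r (c5.getD r 0 + 1)) (PySem.Dict.empty : PySem.Dict Int Int)
  let last := (PySem.List.enumerate recent_results 0).foldl
    (fun last p => last.insert p.2 p.1) PySem.Dict.empty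
  ((PySem.List.pyRange 1 7 1).foldl (fun heat_scores athlete_id =>
    let s5 := c5.getD athlete_id 0
    let d : Int := match last.get? athlete_id with
      | some i => n - 1 - i
      | none => n
    heat_scores.insert athlete_id
      [("base_score", (PySem.Dict.mk total_wins).getD athlete_id 0),
       ("recent_10_wins", c10.getD athlete_id 0),
       ("recent_5_wins", s5),
       ("last_win_distance", d),
       ("pressure_score", min (d * 2) 20),
       ("cooling_factor", max 0 (s5 - 1) * 3)])
    PySem.Dict.empty).items

-- ===== PRECONDITION & SPEC =====
def Spec_calculate_heat_index (recent_results : List Int) (total_wins : List (Int × Int)) (out : List (Int × List (String × Int))) : Prop := out = calculate_heat_index_alt recent_results total_wins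
instance (recent_results : List Int) (total_wins : List (Int × Int)) (out : List (Int × List (String × Int))) : Decidable (Spec_calculate_heat_index recent_results total_wins out) := by unfold Spec_calculate_heat_index; infer_instance

-- ===== CLAIM (what is proved, stated in full; the proofs are below) =====
def Claim_equal_calculate_heat_index : Prop := ∀ (recent_results : List Int) (total_wins : List (Int × Int)), Dom_calculate_heat_index recent_results total_wins → Spec_calculate_heat_index recent_results total_wins (calculate_heat_index recent_results total_wins)

-- ===== LEMMAS AND PROOFS =====

-- a negative-start slice that covers the whole list is the list
theorem pv_slice10_all (xs : List Int) (h : xs.length ≤ 10) :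
    PySem.List.slice xs (some (-10)) none = xs := by
  simp only [PySem.List.slice, Int.reduceNeg, Nat.ofNat_pos, PySem.List.clampIdx_neg_ofNat]
  have h0 : xs.length - 10 = 0 := by omega
  simp [h0]

theorem pv_slice5_all (xs : List Int) (h : xs.length ≤ 5) :
    PySem.List.slice xs (some (-5)) none = xs := by
  simp only [PySem.List.slice, Int.reduceNeg, Nat.ofNat_pos, PySem.List.clampIdx_neg_ofNat]
  have h0 : xs.length - 5 = 0 := by omega
  simp [h0]

-- B's increment loop is collections-style counting: its table reads back as list.count
theorem pv_getD_countfold (xs : List Int) (v : Int) :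
    ((xs.foldl (fun c r => c.insert r (c.getD r 0 + 1)) (PySem.Dict.empty : PySem.Dict Int Int)).getD v 0)
      = (PySem.List.count xs v : Int) := by
  have : (xs.foldl (fun c r => c.insert r (c.getD r 0 + 1)) (PySem.Dict.empty : PySem.Dict Int Int))
      = PySem.Dict.counter xs := by
    rw [PySem.Dict.counter_eq_foldl]
    rfl
  rw [this, PySem.Dict.getD_counter]
  rfl

theorem pv_enumerate_append (xs : List Int) (x : Int) (s : Int) :
    PySem.List.enumerate (xs ++ [x]) s = PySem.List.enumerate xs s ++ [(s + xs.length, x)] := by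
  induction xs generalizing s with
  | nil => simp [PySem.List.enumerate]
  | cons y t ih =>
    simp only [List.cons_append, PySem.List.enumerate, ih, List.length_cons]
    have hc : s + 1 + (t.length : Int) = s + ((t.length + 1 : Nat) : Int) := by push_cast; ring
    rw [hc]

-- shifting the running index and the fallback of A's reversed scan by one
theorem pv_loopA_shift (id fb : Int) (l : List Int) (i : Int) :
    pvLoopA id (fb + 1) l (i + 1) = pvLoopA id fb l i + 1 := by
  induction l generalizing i with
  | nil => rfl
  | cons r t ih =>
    simp only [pvLoopA]
    split_ifs <;> simp [ih]

-- A's distance (first hit scanning from the right) = B's distance (n-1-last forward index)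
theorem pv_dist_eq (xs : List Int) (id : Int) :
    pvLoopA id (xs.length : Int) xs.reverse 0
      = (match ((PySem.List.enumerate xs 0).foldl
            (fun last p => last.insert p.2 p.1) PySem.Dict.empty).get? id with
         | some i => (xs.length : Int) - 1 - i
         | none => (xs.length : Int)) := by
  induction xs using List.reverseRecOn with
  | nil => rfl
  | append_singleton t x ih =>
    rw [pv_enumerate_append, List.foldl_append]
    simp only [List.foldl_cons, List.foldl_nil, List.reverse_append, List.reverse_singleton,
      List.singleton_append, List.length_append, List.length_singleton]
    by_cases hx : x = id
    · subst hx
      rw [PySem.Dict.get?_insert_self]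
      simp only [pvLoopA, if_true]
      push_cast
      ring
    · rw [PySem.Dict.get?_insert_of_ne _ _ (fun h => hx h.symm)]
      simp only [pvLoopA, if_neg hx]
      have h1 : ((t.length + 1 : Nat) : Int) = (t.length : Int) + 1 := by push_cast; ring
      have hs := pv_loopA_shift id (t.length : Int) t.reverse 0
      rw [h1, hs, ih]
      cases h : ((PySem.List.enumerate t 0).foldl
          (fun last p => last.insert p.2 p.1) PySem.Dict.empty).get? id with
      | none => simp
      | some i => simp; ring

-- per-athlete equality of the inner update functions of the two folds
theorem pv_body_eq (recent_results : List Int) (total_wins : List (Int × Int))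
    (d : PySem.Dict Int (List (String × Int))) (athlete_id : Int) :
    (let base_score := (PySem.Dict.mk total_wins).getD athlete_id 0
     let recent_10 := if recent_results.length ≥ 10 then PySem.List.slice recent_results (some (-10)) none else recent_results
     let recent_wins : Int := PySem.List.count recent_10 athlete_id
     let recent_5 := if recent_results.length ≥ 5 then PySem.List.slice recent_results (some (-5)) none else recent_results
     let super_recent_wins : Int := PySem.List.count recent_5 athlete_id
     let last_win_distance := pvLoopA athlete_id (recent_results.length : Int) recent_results.reverse 0
     d.insert athlete_id
       [("base_score", base_score),
        ("recent_10_wins", recent_wins),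
        ("recent_5_wins", super_recent_wins),
        ("last_win_distance", last_win_distance),
        ("pressure_score", min (last_win_distance * 2) 20),
        ("cooling_factor", max 0 (super_recent_wins - 1) * 3)])
    = (let n : Int := recent_results.length
       let c10 := (PySem.List.slice recent_results (some (-10)) none).foldl
         (fun c10 r => c10.insert r (c10.getD r 0 + 1)) (PySem.Dict.empty : PySem.Dict Int Int)
       let c5 := (PySem.List.slice recent_results (some (-5)) none).foldl
         (fun c5 r => c5.insert r (c5.getD r 0 + 1)) (PySem.Dict.empty : PySem.Dict Int Int)
       let last := (PySem.List.enumerate recent_results 0).foldl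
         (fun last p => last.insert p.2 p.1) PySem.Dict.empty
       let s5 := c5.getD athlete_id 0
       let dd : Int := match last.get? athlete_id with
         | some i => n - 1 - i
         | none => n
       d.insert athlete_id
         [("base_score", (PySem.Dict.mk total_wins).getD athlete_id 0),
          ("recent_10_wins", c10.getD athlete_id 0),
          ("recent_5_wins", s5),
          ("last_win_distance", dd),
          ("pressure_score", min (dd * 2) 20),
          ("cooling_factor", max 0 (s5 - 1) * 3)]) := by
  simp only
  have h10 : (if recent_results.length ≥ 10 then PySem.List.slice recent_results (some (-10)) none else recent_results)
      = PySem.List.slice recent_results (some (-10)) none := by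
    split_ifs with h
    · rfl
    · exact (pv_slice10_all recent_results (by omega)).symm
  have h5 : (if recent_results.length ≥ 5 then PySem.List.slice recent_results (some (-5)) none else recent_results)
      = PySem.List.slice recent_results (some (-5)) none := by
    split_ifs with h
    · rfl
    · exact (pv_slice5_all recent_results (by omega)).symm
  rw [h10, h5, pv_getD_countfold, pv_getD_countfold, pv_dist_eq]

-- ===== VERDICT (by name: the statement is the Claim_ definition above) =====
theorem calculate_heat_index_spec : Claim_equal_calculate_heat_index := by
  intro recent_results total_wins _
  unfold Spec_calculate_heat_index calculate_heat_index calculate_heat_index_alt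
  simp only
  congr 1
  apply PySem.List.foldl_congr_mem
  intro acc id _
  exact pv_body_eq recent_results total_wins acc id
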